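-- pv_equiv track=rewrite | github.com/vanjababic/operacionaIstrazivanja | projekat.py | tezine
-- ===== SOURCE A (Python) =====
-- def tezine(pocetnoResenje, cene, u, v):
--     tezine = []
--     for i, red in enumerate(cene):
--         for j, cena in enumerate(red):
--             nijeBazno = all([index[0] != i or index[1] != j for index,vrednost in pocetnoResenje])
--             if nijeBazno:
--                 tezine.append(((i, j), cena - u[i] - v[j]))
--     return tezine
-- ===== SOURCE B (Python) =====
-- def tezine(pocetnoResenje, cene, u, v):
--     # sort the basic-cell coordinates once, then merge-sweep the grid in
--     # row-major order with a single advancing pointer (no per-cell membership scan)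
--     ks = sorted(index for index, vrednost in pocetnoResenje)
--     rez = []
--     ptr = 0
--     for i, red in enumerate(cene):
--         for j, cena in enumerate(red):
--             while ptr < len(ks) and ks[ptr] < (i, j):
--                 ptr += 1
--             if ptr < len(ks) and ks[ptr] == (i, j):
--                 continue
--             rez.append(((i, j), cena - u[i] - v[j]))
--     return rez
-- ===== Notes on version B (the rewrite author's own statement) =====
-- stated objective: faster
-- what changed: A scans the whole pocetnoResenje list once per grid cell to test basicness; B sorts the basic-cell coordinates once and then merges the two ordered sequences, sweeping the grid in row-major order with a single monotonically advancing pointer, so the inner membership scan disappears.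
import Mathlib
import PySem

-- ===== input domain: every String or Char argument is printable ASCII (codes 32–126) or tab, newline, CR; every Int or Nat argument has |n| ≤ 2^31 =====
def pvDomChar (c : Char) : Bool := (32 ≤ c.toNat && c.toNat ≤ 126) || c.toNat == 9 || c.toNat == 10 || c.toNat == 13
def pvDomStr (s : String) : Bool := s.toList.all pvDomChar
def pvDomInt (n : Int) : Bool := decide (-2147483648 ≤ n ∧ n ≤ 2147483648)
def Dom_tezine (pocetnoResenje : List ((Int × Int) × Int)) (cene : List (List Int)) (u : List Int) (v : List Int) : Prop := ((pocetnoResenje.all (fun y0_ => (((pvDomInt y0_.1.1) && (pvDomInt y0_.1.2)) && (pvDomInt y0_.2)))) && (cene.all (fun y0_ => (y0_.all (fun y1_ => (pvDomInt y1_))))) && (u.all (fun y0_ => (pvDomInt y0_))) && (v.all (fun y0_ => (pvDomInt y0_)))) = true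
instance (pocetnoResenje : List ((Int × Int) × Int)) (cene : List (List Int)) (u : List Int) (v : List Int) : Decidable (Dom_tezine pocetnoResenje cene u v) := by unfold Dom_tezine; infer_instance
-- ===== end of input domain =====

-- B sorts the basic-cell coordinates once and sweeps the grid in row-major order with a single
-- advancing pointer (merge of two ordered sequences), instead of A's per-cell scan of pocetnoResenje.

-- ===== PORT A =====
-- u[i] / v[j] ported with pyGetD; Pre_tezine holds exactly where Python A raises no IndexError.
def tezine (pocetnoResenje : List ((Int × Int) × Int)) (cene : List (List Int)) (u : List Int) (v : List Int) : List ((Int × Int) × Int) :=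
  (PySem.List.enumerate cene).foldl (fun acc ir =>
    (PySem.List.enumerate ir.2).foldl (fun acc2 jc =>
      let nijeBazno := pocetnoResenje.all (fun iv => !(iv.1.1 == ir.1) || !(iv.1.2 == jc.1))
      if nijeBazno then
        acc2 ++ [((ir.1, jc.1), jc.2 - PySem.List.pyGetD u ir.1 0 - PySem.List.pyGetD v jc.1 0)]
      else acc2) acc) []

-- ===== PORT B =====
-- Python's '<' on pairs of ints is the lexicographic order: exactly 'toLex a < toLex b'.
def lexLt (a b : Int × Int) : Bool := decide (toLex a < toLex b)

-- the 'while ptr < len(ks) and ks[ptr] < key: ptr += 1' loop of Source B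
def advance (ks : List (Int × Int)) (key : Int × Int) (ptr : Nat) : Nat :=
  if h : ptr < ks.length then
    if lexLt ks[ptr] key then advance ks key (ptr + 1) else ptr
  else ptr
termination_by ks.length - ptr

-- the body of Source B's inner loop: advance the pointer, skip a basic cell, append otherwise
def stepF (ks : List (Int × Int)) (st : Nat × List ((Int × Int) × Int)) (c : (Int × Int) × Int) : Nat × List ((Int × Int) × Int) :=
  let ptr := advance ks c.1 st.1
  if hp : ptr < ks.length then
    if ks[ptr] == c.1 then (ptr, st.2) else (ptr, st.2 ++ [c])
  else (ptr, st.2 ++ [c])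

-- sorted(...) on int pairs = PySem sort under the lexicographic order (key = toLex)
def tezine_alt (pocetnoResenje : List ((Int × Int) × Int)) (cene : List (List Int)) (u : List Int) (v : List Int) : List ((Int × Int) × Int) :=
  let ks := PySem.List.sorted (pocetnoResenje.map Prod.fst) (fun x => toLex x) false
  ((PySem.List.enumerate cene).foldl (fun st ir =>
    (PySem.List.enumerate ir.2).foldl (fun st2 jc =>
      stepF ks st2 ((ir.1, jc.1), jc.2 - PySem.List.pyGetD u ir.1 0 - PySem.List.pyGetD v jc.1 0)) st)
    ((0 : Nat), ([] : List ((Int × Int) × Int)))).2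

-- ===== PRECONDITION & SPEC =====
-- Pre_ is exactly A's (and B's) non-raising domain: every non-basic grid cell must index u and v.
def Pre_tezine (pocetnoResenje : List ((Int × Int) × Int)) (cene : List (List Int)) (u : List Int) (v : List Int) : Prop :=
  ∀ i : Nat, i < cene.length → ∀ j : Nat, j < (cene.getD i []).length →
    ((i : Int), (j : Int)) ∈ pocetnoResenje.map Prod.fst ∨ (i < u.length ∧ j < v.length)
instance (pocetnoResenje : List ((Int × Int) × Int)) (cene : List (List Int)) (u : List Int) (v : List Int) : Decidable (Pre_tezine pocetnoResenje cene u v) := by unfold Pre_tezine; infer_instance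
def pvWitness_tezine : (List ((Int × Int) × Int)) × List (List Int) × List Int × List Int :=
  ([((0, 0), 5)], [[3, 4], [1, 2]], [1, 1], [2, 2])
def Spec_tezine (pocetnoResenje : List ((Int × Int) × Int)) (cene : List (List Int)) (u : List Int) (v : List Int) (out : List ((Int × Int) × Int)) : Prop := out = tezine_alt pocetnoResenje cene u v
instance (pocetnoResenje : List ((Int × Int) × Int)) (cene : List (List Int)) (u : List Int) (v : List Int) (out : List ((Int × Int) × Int)) : Decidable (Spec_tezine pocetnoResenje cene u v out) := by unfold Spec_tezine; infer_instance

-- ===== CLAIM (what is proved, stated in full; the proofs are below) =====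
def Claim_equal_tezine : Prop := ∀ (pocetnoResenje : List ((Int × Int) × Int)) (cene : List (List Int)) (u : List Int) (v : List Int), Dom_tezine pocetnoResenje cene u v → Pre_tezine pocetnoResenje cene u v → Spec_tezine pocetnoResenje cene u v (tezine pocetnoResenje cene u v)


-- ===== LEMMAS AND PROOFS =====

theorem lexLt_iff (a b : Int × Int) : lexLt a b = true ↔ toLex a < toLex b := by
  simp [lexLt]

theorem lexLt_irrefl (a : Int × Int) : lexLt a a = false := by
  simp [lexLt]

theorem lexLt_trans {a b c : Int × Int} (h1 : lexLt a b = true) (h2 : lexLt b c = true) :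
    lexLt a c = true := by
  rw [lexLt_iff] at *
  exact lt_trans h1 h2

-- A's elementwise test at cell (i, j) is the negated key equality
theorem keyTest (i j : Int) (iv : (Int × Int) × Int) :
    (!(iv.1.1 == i) || !(iv.1.2 == j)) = !((i, j) == iv.1) := by
  obtain ⟨⟨a, b⟩, c⟩ := iv
  show (!(a == i) || !(b == j)) = !((i == a) && (j == b))
  by_cases h1 : a = i <;> by_cases h2 : b = j
  · simp [h1, h2]
  · rw [beq_false_of_ne h2, beq_false_of_ne (Ne.symm h2)]; simp
  · rw [beq_false_of_ne h1, beq_false_of_ne (Ne.symm h1)]; simp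
  · rw [beq_false_of_ne h1, beq_false_of_ne (Ne.symm h1)]; simp

-- A's per-cell all-test equals non-membership in B's sorted key list
theorem testEq (p : List ((Int × Int) × Int)) (i j : Int) :
    (p.all fun iv => !(iv.1.1 == i) || !(iv.1.2 == j))
      = !decide (((i, j) : Int × Int) ∈ PySem.List.sorted (p.map Prod.fst) (fun x => toLex x) false) := by
  simp only [PySem.List.mem_sorted]
  rw [show (p.all fun iv => !(iv.1.1 == i) || !(iv.1.2 == j))
        = (p.all fun iv => !((i, j) == iv.1)) from
    congrArg p.all (funext fun iv => keyTest i j iv)]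
  induction p with
  | nil => simp
  | cons iv t ih =>
    rw [List.all_cons, Bool.and_comm, ih]
    by_cases h : ((i, j) : Int × Int) = iv.1
    · simp [List.mem_cons, h]
    · simp [List.mem_cons, h, beq_false_of_ne h]

-- the while loop: never moves back, stops at the first element not below the key
theorem advance_spec (ks : List (Int × Int)) (key : Int × Int) :
    ∀ ptr, ptr ≤ ks.length →
      ptr ≤ advance ks key ptr ∧ advance ks key ptr ≤ ks.length ∧
      (∀ m (hm : m < ks.length), ptr ≤ m → m < advance ks key ptr → lexLt (ks[m]'hm) key = true) ∧
      (∀ h : advance ks key ptr < ks.length, lexLt (ks[advance ks key ptr]'h) key = false) := by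
  intro ptr
  induction ptr using advance.induct (ks := ks) (key := key) with
  | case1 x h hlt ih =>
    intro _
    rw [advance, dif_pos h, if_pos hlt]
    obtain ⟨ih1, ih2, ih3, ih4⟩ := ih (by omega)
    refine ⟨by omega, ih2, ?_, ih4⟩
    intro m hm h1 h2
    by_cases hmp : m = x
    · subst hmp; exact hlt
    · exact ih3 m hm (by omega) h2
  | case2 x h hlt =>
    intro _
    rw [advance, dif_pos h, if_neg hlt]
    exact ⟨le_refl _, by omega, fun m hm h1 h2 => by omega,
      fun hh => by simpa using hlt⟩
  | case3 x h =>
    intro hle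
    rw [advance, dif_neg h]
    exact ⟨le_refl _, hle, fun m hm h1 h2 => by omega, fun hh => absurd hh h⟩

-- the sweep over a strictly increasing cell list filters out exactly the keys present in ks
theorem sweep (ks : List (Int × Int)) (hs : ks.Pairwise (fun a b => toLex a ≤ toLex b)) :
    ∀ (cells : List ((Int × Int) × Int)) (ptr : Nat) (acc : List ((Int × Int) × Int)),
      ptr ≤ ks.length →
      (∀ m (hm : m < ks.length), m < ptr → ∀ c ∈ cells, lexLt (ks[m]'hm) c.1 = true) →
      cells.Pairwise (fun c d => lexLt c.1 d.1 = true) →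
      (cells.foldl (stepF ks) (ptr, acc)).2 = acc ++ cells.filter (fun c => !decide (c.1 ∈ ks)) := by
  intro cells
  induction cells with
  | nil => intro ptr acc _ _ _; simp
  | cons c cs ih =>
    intro ptr acc hle hinv hpw
    obtain ⟨hpw1, hpw2⟩ := List.pairwise_cons.mp hpw
    obtain ⟨ha1, ha2, ha3, ha4⟩ := advance_spec ks c.1 ptr hle
    set a := advance ks c.1 ptr with hadef
    -- every index below the new pointer holds a key strictly below c.1
    have hall : ∀ m (hm : m < ks.length), m < a → lexLt (ks[m]'hm) c.1 = true := by
      intro m hm hma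
      by_cases hmp : m < ptr
      · exact hinv m hm hmp c (by simp)
      · exact ha3 m hm (by omega) hma
    -- invariant for the tail
    have hinv' : ∀ m (hm : m < ks.length), m < a → ∀ d ∈ cs, lexLt (ks[m]'hm) d.1 = true := by
      intro m hm hma d hd
      exact lexLt_trans (hall m hm hma) (hpw1 d hd)
    -- the step: pointer moves to a, c is kept iff its key is absent from ks
    have hstep : stepF ks (ptr, acc) c = (a, if decide (c.1 ∈ ks) then acc else acc ++ [c]) := by
      by_cases hmem : c.1 ∈ ks
      · obtain ⟨n, hn, hget⟩ := List.getElem_of_mem hmem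
        have hna : ¬ n < a := by
          intro hlt
          have hx := hall n hn hlt
          rw [hget, lexLt_irrefl] at hx
          exact Bool.false_ne_true hx
        have halen : a < ks.length := by omega
        have heq : ks[a]'halen = c.1 := by
          have hle2 : toLex (ks[a]'halen) ≤ toLex c.1 := by
            by_cases han : a = n
            · subst han; rw [hget]
            · have := List.pairwise_iff_getElem.mp hs a n halen hn (by omega)
              rw [hget] at this
              exact this
          have hge : ¬ toLex (ks[a]'halen) < toLex c.1 := by
            have h4 := ha4 halen
            simp only [lexLt, decide_eq_false_iff_not] at h4
            exact h4
          exact toLex.injective (le_antisymm hle2 (not_lt.mp hge))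
        rw [stepF, ← hadef]
        rw [dif_pos halen, if_pos (by rw [heq]; simp)]
        simp [hmem]
      · rw [stepF, ← hadef]
        by_cases halen : a < ks.length
        · have hne : ks[a]'halen ≠ c.1 := fun he => hmem (he ▸ List.getElem_mem halen)
          rw [dif_pos halen, if_neg (by simpa using hne)]
          simp [hmem]
        · rw [dif_neg halen]
          simp [hmem]
    rw [List.foldl_cons, hstep]
    by_cases hmem : c.1 ∈ ks
    · rw [if_pos (by simpa using hmem)]
      rw [ih a acc ha2 hinv' hpw2]
      rw [List.filter_cons_of_neg (by simpa using hmem)]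
    · rw [if_neg (by simpa using hmem)]
      rw [ih a (acc ++ [c]) ha2 hinv' hpw2]
      rw [List.filter_cons_of_pos (by simpa using hmem)]
      simp

-- row-major cell keys are strictly increasing in the lexicographic order
theorem cells_pairwise (cene : List (List Int)) (f : Int × List Int → Int × Int → (Int × Int) × Int)
    (hf : ∀ ir jc, (f ir jc).1 = (ir.1, jc.1)) :
    ((PySem.List.enumerate cene).flatMap (fun ir =>
        (PySem.List.enumerate ir.2).map (fun jc => f ir jc))).Pairwise
      (fun c d => lexLt c.1 d.1 = true) := by
  rw [List.pairwise_flatMap]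
  constructor
  · intro ir _
    rw [List.pairwise_map]
    refine (PySem.List.pairwise_lt_enumerate ir.2 0).imp ?_
    intro jc jc' hlt
    rw [hf, hf, lexLt_iff, Prod.Lex.toLex_lt_toLex]
    exact Or.inr ⟨rfl, hlt⟩
  · refine (PySem.List.pairwise_lt_enumerate cene 0).imp ?_
    intro ir ir' hlt x hx y hy
    obtain ⟨jc, _, rfl⟩ := List.mem_map.mp hx
    obtain ⟨jc', _, rfl⟩ := List.mem_map.mp hy
    rw [hf, hf, lexLt_iff, Prod.Lex.toLex_lt_toLex]
    exact Or.inl hlt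

-- ===== VERDICT (by name: the statement is the Claim_ definition above) =====
theorem tezine_spec : Claim_equal_tezine := by
  intro p cene u v _ _
  show tezine p cene u v = tezine_alt p cene u v
  set ks := PySem.List.sorted (p.map Prod.fst) (fun x => toLex x) false with hks
  have hsort : ks.Pairwise (fun a b => toLex a ≤ toLex b) := by
    rw [hks]; exact PySem.List.sorted_pairwise (p.map Prod.fst) (fun x => toLex x)
  have hA : tezine p cene u v
      = (PySem.List.enumerate cene).flatMap (fun ir =>
          ((PySem.List.enumerate ir.2).filter (fun jc =>
              p.all (fun iv => !(iv.1.1 == ir.1) || !(iv.1.2 == jc.1)))).map (fun jc =>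
            ((ir.1, jc.1), jc.2 - PySem.List.pyGetD u ir.1 0 - PySem.List.pyGetD v jc.1 0))) := by
    unfold tezine
    simp only [PySem.List.foldl_append_if, PySem.List.foldl_append_eq_flatMap, List.nil_append]
  have hcells : ((PySem.List.enumerate cene).flatMap (fun ir =>
        (PySem.List.enumerate ir.2).map (fun jc =>
          ((ir.1, jc.1), jc.2 - PySem.List.pyGetD u ir.1 0 - PySem.List.pyGetD v jc.1 0)))).Pairwise
      (fun c d => lexLt c.1 d.1 = true) :=
    cells_pairwise cene
      (fun ir jc => ((ir.1, jc.1), jc.2 - PySem.List.pyGetD u ir.1 0 - PySem.List.pyGetD v jc.1 0))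
      (fun ir jc => rfl)
  have hfun : (fun (st : Nat × List ((Int × Int) × Int)) (ir : Int × List Int) =>
        ((PySem.List.enumerate ir.2).map (fun jc =>
          ((ir.1, jc.1), jc.2 - PySem.List.pyGetD u ir.1 0 - PySem.List.pyGetD v jc.1 0))).foldl
          (stepF ks) st)
      = (fun st ir => (PySem.List.enumerate ir.2).foldl (fun st2 jc =>
          stepF ks st2 ((ir.1, jc.1), jc.2 - PySem.List.pyGetD u ir.1 0 - PySem.List.pyGetD v jc.1 0)) st) := by
    funext st ir
    rw [List.foldl_map]
  have hB : tezine_alt p cene u v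
      = ((PySem.List.enumerate cene).flatMap (fun ir =>
          (PySem.List.enumerate ir.2).map (fun jc =>
            ((ir.1, jc.1), jc.2 - PySem.List.pyGetD u ir.1 0 - PySem.List.pyGetD v jc.1 0)))).filter
          (fun c => !decide (c.1 ∈ ks)) := by
    show ((PySem.List.enumerate cene).foldl (fun st ir =>
        (PySem.List.enumerate ir.2).foldl (fun st2 jc =>
          stepF ks st2 ((ir.1, jc.1), jc.2 - PySem.List.pyGetD u ir.1 0 - PySem.List.pyGetD v jc.1 0)) st)
        ((0 : Nat), ([] : List ((Int × Int) × Int)))).2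
      = ((PySem.List.enumerate cene).flatMap (fun ir =>
          (PySem.List.enumerate ir.2).map (fun jc =>
            ((ir.1, jc.1), jc.2 - PySem.List.pyGetD u ir.1 0 - PySem.List.pyGetD v jc.1 0)))).filter
          (fun c => !decide (c.1 ∈ ks))
    rw [← hfun, ← List.foldl_flatMap]
    rw [sweep ks hsort _ 0 [] (by omega) (by intro m hm hcon; omega) hcells]
    rw [List.nil_append]
  rw [hA, hB, List.filter_flatMap]
  refine congrArg (fun F => List.flatMap F (PySem.List.enumerate cene)) ?_
  funext ir
  rw [List.filter_map]
  congr 1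
  refine List.filter_congr (fun jc _ => ?_)
  show (p.all fun iv => !(iv.1.1 == ir.1) || !(iv.1.2 == jc.1)) = !decide ((ir.1, jc.1) ∈ ks)
  rw [hks]
  exact testEq p ir.1 jc.1
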